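-- pv_equiv track=rewrite | github.com/soyukke/lean-unsolved | scripts/collatz_symbolic.py | syracuse_with_symbol
-- ===== SOURCE A (Python) =====
-- def syracuse_with_symbol(n):
--     """
--     奇数 n に対する Syracuse map と記号を返す。
--     A = 上昇 (v2=1, n ≡ 3 mod 4)
--     D_k = 下降 (v2=k, k>=2)
--     """
--     x = 3 * n + 1
--     v2 = 0
--     while x % 2 == 0:
--         x //= 2
--         v2 += 1
--     if v2 == 1:
--         symbol = 'A'
--     else:
--         symbol = f'D{v2}'
--     return x, symbol
-- ===== SOURCE B (Python) =====
-- def syracuse_with_symbol(n):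
--     """
--     奇数 n に対する Syracuse map と記号を返す。(loop-free variant)
--     A = 上昇 (v2=1, n ≡ 3 mod 4)
--     D_k = 下降 (v2=k, k>=2)
--     """
--     x = 3 * n + 1
--     # x != 0 always, so (x & -x) is its lowest set bit; its bit_length minus 1
--     # is the exact 2-adic valuation of x, with no loop.
--     v2 = (x & -x).bit_length() - 1
--     x >>= v2
--     if v2 == 1:
--         symbol = 'A'
--     else:
--         symbol = f'D{v2}'
--     return x, symbol
-- ===== Notes on version B (the rewrite author's own statement) =====
-- stated objective: idiomatic
-- what changed: The trial-division while loop is replaced by a closed-form 2-adic valuation via the lowest-set-bit trick (x & -x).bit_length() - 1 followed by a single arithmetic shift.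
import Mathlib
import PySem

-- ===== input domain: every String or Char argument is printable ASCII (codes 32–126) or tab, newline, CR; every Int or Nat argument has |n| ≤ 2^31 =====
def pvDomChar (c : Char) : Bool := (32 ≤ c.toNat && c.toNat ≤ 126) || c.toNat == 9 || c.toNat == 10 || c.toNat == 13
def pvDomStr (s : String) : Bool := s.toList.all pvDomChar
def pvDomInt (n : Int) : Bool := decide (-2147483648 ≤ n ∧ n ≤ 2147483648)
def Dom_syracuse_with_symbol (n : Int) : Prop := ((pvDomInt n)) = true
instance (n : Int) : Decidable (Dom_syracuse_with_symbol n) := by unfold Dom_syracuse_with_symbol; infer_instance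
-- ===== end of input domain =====

-- B replaces A's trial-division while loop by a closed-form 2-adic valuation
-- (lowest-set-bit trick (x & -x).bit_length() - 1 and one arithmetic shift); same values everywhere.


-- ===== PORT A =====
-- while x % 2 == 0: x //= 2; v2 += 1   (the 'x ≠ 0' conjunct is a pure totality
-- guard: Python would loop forever at x = 0, and x = 3n+1 is never 0)
def pvLoopA (x : Int) (v2 : Int) : Int × Int :=
  if h : PySem.Int.mod x 2 = 0 ∧ x ≠ 0 then
    pvLoopA (PySem.Int.floordiv x 2) (v2 + 1)
  else (x, v2)
termination_by x.natAbs
decreasing_by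
  rw [PySem.Int.floordiv_eq_ediv_of_pos (by omega : (0:Int) < 2)]
  have hm : x % 2 = 0 := by
    have := h.1
    rwa [PySem.Int.mod_eq_emod_of_pos (by omega : (0:Int) < 2)] at this
  omega

def syracuse_with_symbol (n : Int) : Int × String :=
  let x := 3 * n + 1
  let r := pvLoopA x 0
  let symbol := if r.2 == 1 then "A" else "D" ++ PySem.Int.toStr r.2
  (r.1, symbol)

-- ===== PORT B =====
def syracuse_with_symbol_alt (n : Int) : Int × String :=
  let x := 3 * n + 1
  let v2 : Nat := PySem.Int.bitLength (PySem.Int.band x (-x)) - 1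
  let x2 := x >>> v2
  let symbol := if (v2 : Int) == 1 then "A" else "D" ++ PySem.Int.toStr (v2 : Int)
  (x2, symbol)

-- ===== PRECONDITION & SPEC =====
def Spec_syracuse_with_symbol (n : Int) (out : Int × String) : Prop := out = syracuse_with_symbol_alt n
instance (n : Int) (out : Int × String) : Decidable (Spec_syracuse_with_symbol n out) := by unfold Spec_syracuse_with_symbol; infer_instance

-- ===== CLAIM (what is proved, stated in full; the proofs are below) =====
def Claim_equal_syracuse_with_symbol : Prop := ∀ (n : Int), Dom_syracuse_with_symbol n → Spec_syracuse_with_symbol n (syracuse_with_symbol n)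

-- ===== LEMMAS AND PROOFS =====

-- the trailing-zero count B computes (as a named abbreviation for the proofs)
def pvTz (x : Int) : Nat := PySem.Int.bitLength (PySem.Int.band x (-x)) - 1

-- x & -x as a Nat computation on |x|
theorem pv_band_self_neg (x : Int) (hx : x ≠ 0) :
    PySem.Int.band x (-x) = ((x.natAbs - (x.natAbs &&& (x.natAbs - 1)) : Nat) : Int) := by
  unfold PySem.Int.band
  rcases lt_or_gt_of_ne hx with h | h
  · rw [if_neg (by omega), if_pos (by omega)]
    have h1 : (-x).toNat = x.natAbs := by omega
    have h2 : (-x - 1).toNat = x.natAbs - 1 := by omega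
    rw [h1, h2]
  · rw [if_pos (by omega), if_neg (by omega)]
    have h1 : x.toNat = x.natAbs := by omega
    have h2 : (-(-x) - 1).toNat = x.natAbs - 1 := by omega
    rw [h1, h2]

-- m &&& (m-1) is always even
theorem pv_land_pred_even (m : Nat) : (m &&& (m - 1)) % 2 = 0 := by
  rw [← Nat.and_one_is_mod, Nat.and_assoc, Nat.and_one_is_mod]
  by_cases hm : m % 2 = 1
  · have h1 : (m - 1) % 2 = 0 := by omega
    simp [h1]
  · rcases Nat.eq_zero_or_pos m with h0 | h0
    · simp [h0]
    · have h1 : (m - 1) % 2 = 1 := by omega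
      rw [h1, Nat.and_one_is_mod]
      omega

theorem pv_g_pos (m : Nat) (hm : 0 < m) : 0 < m - (m &&& (m - 1)) := by
  have h := Nat.and_le_right (n := m) (m := m - 1)
  omega

theorem pv_g_odd (m : Nat) (h : m % 2 = 1) : m - (m &&& (m - 1)) = 1 := by
  have hd : (m &&& (m - 1)) / 2 = m / 2 &&& (m - 1) / 2 := Nat.and_div_two
  have he : (m - 1) / 2 = m / 2 := by omega
  rw [he, Nat.and_self] at hd
  have hp := pv_land_pred_even m
  omega

theorem pv_g_even (m : Nat) (hm : 0 < m) (h : m % 2 = 0) :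
    m - (m &&& (m - 1)) = 2 * (m / 2 - (m / 2 &&& (m / 2 - 1))) := by
  have hd : (m &&& (m - 1)) / 2 = m / 2 &&& (m - 1) / 2 := Nat.and_div_two
  have he : (m - 1) / 2 = m / 2 - 1 := by omega
  rw [he] at hd
  have hp := pv_land_pred_even m
  have hb := Nat.and_le_right (n := m / 2) (m := m / 2 - 1)
  omega

theorem pv_tz_odd (x : Int) (hx : x ≠ 0) (h : PySem.Int.mod x 2 ≠ 0) : pvTz x = 0 := by
  have hm : x % 2 ≠ 0 := by
    rwa [PySem.Int.mod_eq_emod_of_pos (by omega : (0:Int) < 2)] at h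
  have hodd : x.natAbs % 2 = 1 := by omega
  unfold pvTz
  rw [pv_band_self_neg x hx, pv_g_odd _ hodd]
  decide

theorem pv_tz_even (x : Int) (hx : x ≠ 0) (h : PySem.Int.mod x 2 = 0) :
    pvTz x = pvTz (PySem.Int.floordiv x 2) + 1 := by
  have hm : x % 2 = 0 := by
    rwa [PySem.Int.mod_eq_emod_of_pos (by omega : (0:Int) < 2)] at h
  have hfd : PySem.Int.floordiv x 2 = x / 2 :=
    PySem.Int.floordiv_eq_ediv_of_pos (by omega)
  have hy : (x / 2).natAbs = x.natAbs / 2 := by omega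
  have hy0 : x / 2 ≠ 0 := by omega
  have hm2 : x.natAbs % 2 = 0 := by omega
  have hpos : 0 < x.natAbs := by omega
  have hgpos : 0 < x.natAbs / 2 - (x.natAbs / 2 &&& (x.natAbs / 2 - 1)) :=
    pv_g_pos _ (by omega)
  unfold pvTz
  rw [hfd, pv_band_self_neg x hx, pv_band_self_neg _ hy0, hy,
    pv_g_even _ hpos hm2]
  rw [PySem.Int.bitLength_natCast (by omega), Nat.mul_div_cancel_left _ (by omega : 0 < 2)]
  have hb1 : 1 ≤ PySem.Int.bitLength ((x.natAbs / 2 - (x.natAbs / 2 &&& (x.natAbs / 2 - 1)) : Nat) : Int) := by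
    rw [PySem.Int.bitLength_natCast (by omega)]
    omega
  omega

theorem pv_shift_zero (x : Int) : x >>> (0 : Nat) = x := by
  rw [Int.shiftRight_eq_div_pow]
  simp

theorem pv_shift_succ (x : Int) (k : Nat) :
    x >>> (k + 1 : Nat) = (PySem.Int.floordiv x 2) >>> k := by
  rw [PySem.Int.floordiv_eq_ediv_of_pos (by omega : (0:Int) < 2),
    Int.shiftRight_eq_div_pow, Int.shiftRight_eq_div_pow,
    Int.ediv_ediv_of_nonneg (by omega : (0:Int) ≤ 2)]
  norm_num [pow_succ, mul_comm]

theorem pv_loopA_eq : ∀ (m : Nat) (x : Int), x.natAbs ≤ m → x ≠ 0 → ∀ v2 : Int,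
    pvLoopA x v2 = (x >>> pvTz x, v2 + (pvTz x : Int)) := by
  intro m
  induction m with
  | zero => intro x hle hx v2; omega
  | succ m ih =>
    intro x hle hx v2
    rw [pvLoopA]
    by_cases hc : PySem.Int.mod x 2 = 0
    · rw [dif_pos ⟨hc, hx⟩]
      have hm : x % 2 = 0 := by
        rwa [PySem.Int.mod_eq_emod_of_pos (by omega : (0:Int) < 2)] at hc
      have hfd : PySem.Int.floordiv x 2 = x / 2 :=
        PySem.Int.floordiv_eq_ediv_of_pos (by omega)
      have h2 : (PySem.Int.floordiv x 2).natAbs ≤ m := by omega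
      have h0 : PySem.Int.floordiv x 2 ≠ 0 := by omega
      rw [ih _ h2 h0, pv_tz_even x hx hc, pv_shift_succ]
      simp only [Prod.mk.injEq, true_and]
      push_cast
      ring
    · rw [dif_neg (by tauto), pv_tz_odd x hx hc, pv_shift_zero]
      simp

theorem pv_x_ne_zero (n : Int) : 3 * n + 1 ≠ 0 := by omega

-- ===== VERDICT (by name: the statement is the Claim_ definition above) =====
theorem syracuse_with_symbol_spec : Claim_equal_syracuse_with_symbol := by
  unfold Claim_equal_syracuse_with_symbol
  intro n _
  unfold Spec_syracuse_with_symbol syracuse_with_symbol syracuse_with_symbol_alt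
  have hx := pv_x_ne_zero n
  have h := pv_loopA_eq (3 * n + 1).natAbs (3 * n + 1) le_rfl hx 0
  simp only [h, zero_add]
  rfl
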